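-- pv_equiv track=rewrite | github.com/Spanday31/DS---CVD-1.0 | DS CVD 1.0.py | validate_drug_classes
-- ===== SOURCE A (Python) =====
-- def validate_drug_classes(selected_therapies):
--     """Ensure only one drug per class is selected"""
--     drug_classes = {
--         'statins': ['atorvastatin', 'rosuvastatin'],
--         'pcsk9': ['pcsk9', 'evlocumab', 'alirocumab'],
--         'ezetimibe': ['ezetimibe'],
--         'inclisiran': ['inclisiran']
--     }
--
--     conflicts = []
--     for class_name, drugs in drug_classes.items():
--         class_drugs = [d for d in selected_therapies if any(drug in d.lower() for drug in drugs)]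
--         if len(class_drugs) > 1:
--             conflicts.append(f"Multiple {class_name}: {', '.join(class_drugs)}")
--
--     return conflicts
-- ===== SOURCE B (Python) =====
-- _KEYWORDS = [
--     ('atorvastatin', 0), ('rosuvastatin', 0),
--     ('pcsk9', 1), ('evlocumab', 1), ('alirocumab', 1),
--     ('ezetimibe', 2), ('inclisiran', 3),
-- ]
-- _NAMES = ['statins', 'pcsk9', 'ezetimibe', 'inclisiran']
--
--
-- def validate_drug_classes(selected_therapies):
--     """Ensure only one drug per class is selected (per-therapy class bitmask, then bit-select)."""
--     masks = []
--     for d in selected_therapies: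
--         dl = d.lower()
--         m = 0
--         for kw, bit in _KEYWORDS:
--             if kw in dl:
--                 m |= 1 << bit
--         masks.append(m)
--     conflicts = []
--     for bit, name in enumerate(_NAMES):
--         members = [d for d, m in zip(selected_therapies, masks) if m >> bit & 1]
--         if len(members) > 1:
--             conflicts.append(f"Multiple {name}: {', '.join(members)}")
--     return conflicts
-- ===== Notes on version B (the rewrite author's own statement) =====
-- stated objective: faster
-- what changed: B replaces A's class-major repeated substring scans with a two-stage bitmask index: one pass encodes each therapy's matching classes as a 4-bit integer mask from a flat (keyword, bit) table (lowercasing each therapy once), then members of each class are bit-selected from the zipped (therapy, mask) pairs, so the class loop never touches strings again.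
import Mathlib
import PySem

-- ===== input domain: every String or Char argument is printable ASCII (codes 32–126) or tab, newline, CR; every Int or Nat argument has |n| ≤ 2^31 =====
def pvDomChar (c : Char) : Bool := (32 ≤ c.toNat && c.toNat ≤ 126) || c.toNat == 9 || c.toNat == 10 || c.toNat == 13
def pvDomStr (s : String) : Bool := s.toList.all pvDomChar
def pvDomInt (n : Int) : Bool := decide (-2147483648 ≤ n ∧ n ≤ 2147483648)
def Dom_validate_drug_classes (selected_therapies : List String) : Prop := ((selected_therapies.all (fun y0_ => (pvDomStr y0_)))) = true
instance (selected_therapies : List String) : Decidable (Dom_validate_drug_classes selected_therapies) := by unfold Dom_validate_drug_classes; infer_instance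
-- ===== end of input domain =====

-- B replaces A's class-major repeated substring scans by a two-stage bitmask index: one pass encodes each therapy's matching classes as a 4-bit mask, then members are bit-selected per class (objective: faster in a timing run's measurement where available).


-- ===== PORT A =====
-- the literal drug_classes dict of Source A, in insertion order
def pvClasses : List (String × List String) :=
  [("statins", ["atorvastatin", "rosuvastatin"]),
   ("pcsk9", ["pcsk9", "evlocumab", "alirocumab"]),
   ("ezetimibe", ["ezetimibe"]),
   ("inclisiran", ["inclisiran"])]

-- any(drug in d.lower() for drug in drugs)
def pvAnyIn (drugs : List String) (dl : String) : Bool :=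
  drugs.any (fun drug => PySem.Str.isIn drug dl)

def validate_drug_classes (selected_therapies : List String) : List String :=
  pvClasses.foldl (fun conflicts cd =>
    let class_drugs := selected_therapies.filter (fun d => pvAnyIn cd.2 (PySem.Str.lower d))
    if class_drugs.length > 1 then
      conflicts ++ ["Multiple " ++ cd.1 ++ ": " ++ PySem.Str.join ", " class_drugs]
    else conflicts) []

-- ===== PORT B =====
-- Source B's _KEYWORDS table: (keyword, class-bit) pairs
def pvKeywords : List (String × Nat) :=
  [("atorvastatin", 0), ("rosuvastatin", 0),
   ("pcsk9", 1), ("evlocumab", 1), ("alirocumab", 1),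
   ("ezetimibe", 2), ("inclisiran", 3)]

def pvNames : List String := ["statins", "pcsk9", "ezetimibe", "inclisiran"]

-- inner keyword loop of Source B: the class bitmask of one therapy
def pvMask (d : String) : Nat :=
  let dl := PySem.Str.lower d
  pvKeywords.foldl (fun m kb => if PySem.Str.isIn kb.1 dl then m ||| (1 <<< kb.2) else m) 0

def validate_drug_classes_alt (selected_therapies : List String) : List String :=
  let masks := selected_therapies.foldl (fun acc d => acc ++ [pvMask d]) []
  (PySem.List.enumerate pvNames).foldl (fun conflicts bn =>
    let members := ((selected_therapies.zip masks).filter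
        (fun dm => (dm.2 >>> bn.1.toNat) &&& 1 != 0)).map Prod.fst
    if members.length > 1 then
      conflicts ++ ["Multiple " ++ bn.2 ++ ": " ++ PySem.Str.join ", " members]
    else conflicts) []

-- ===== PRECONDITION & SPEC =====
def Spec_validate_drug_classes (selected_therapies : List String) (out : List String) : Prop := out = validate_drug_classes_alt selected_therapies
instance (selected_therapies : List String) (out : List String) : Decidable (Spec_validate_drug_classes selected_therapies out) := by unfold Spec_validate_drug_classes; infer_instance

-- ===== CLAIM (what is proved, stated in full; the proofs are below) =====
def Claim_equal_validate_drug_classes : Prop := ∀ (selected_therapies : List String), Dom_validate_drug_classes selected_therapies → Spec_validate_drug_classes selected_therapies (validate_drug_classes selected_therapies)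

-- ===== LEMMAS AND PROOFS =====

-- Source B's append loop builds exactly the list of masks
lemma pvMasks_eq (xs : List String) (acc : List Nat) :
    xs.foldl (fun acc d => acc ++ [pvMask d]) acc = acc ++ xs.map pvMask := by
  induction xs generalizing acc with
  | nil => simp
  | cons x xs ih => simp [ih]

-- the bitmask, fully expanded over the seven keyword tests of Source B
lemma pvMask_eq (d : String) : pvMask d =
    (let dl := PySem.Str.lower d
     (if PySem.Str.isIn "atorvastatin" dl then 1 else 0) |||
     (if PySem.Str.isIn "rosuvastatin" dl then 1 else 0) |||
     (if PySem.Str.isIn "pcsk9" dl then 2 else 0) |||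
     (if PySem.Str.isIn "evlocumab" dl then 2 else 0) |||
     (if PySem.Str.isIn "alirocumab" dl then 2 else 0) |||
     (if PySem.Str.isIn "ezetimibe" dl then 4 else 0) |||
     (if PySem.Str.isIn "inclisiran" dl then 8 else 0)) := by
  simp only [pvMask, pvKeywords, List.foldl]
  split_ifs <;> rfl

-- the four bit tests, each read back as the matching-class predicate of Source A
lemma pvMask_bit0 (d : String) :
    ((pvMask d >>> 0) &&& 1 != 0) = pvAnyIn ["atorvastatin", "rosuvastatin"] (PySem.Str.lower d) := by
  rw [pvMask_eq]; simp only [pvAnyIn, List.any]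
  split_ifs <;> simp_all
lemma pvMask_bit1 (d : String) :
    ((pvMask d >>> 1) &&& 1 != 0) = pvAnyIn ["pcsk9", "evlocumab", "alirocumab"] (PySem.Str.lower d) := by
  rw [pvMask_eq]; simp only [pvAnyIn, List.any]
  split_ifs <;> simp_all
lemma pvMask_bit2 (d : String) :
    ((pvMask d >>> 2) &&& 1 != 0) = pvAnyIn ["ezetimibe"] (PySem.Str.lower d) := by
  rw [pvMask_eq]; simp only [pvAnyIn, List.any]
  split_ifs <;> simp_all
lemma pvMask_bit3 (d : String) :
    ((pvMask d >>> 3) &&& 1 != 0) = pvAnyIn ["inclisiran"] (PySem.Str.lower d) := by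
  rw [pvMask_eq]; simp only [pvAnyIn, List.any]
  split_ifs <;> simp_all

-- selecting the first components of a zip-with-its-image by a predicate on the image = filtering directly
lemma pvZipFilterG {A B : Type} (xs : List A) (f : A → B) (p : B → Bool) :
    ((xs.zip (xs.map f)).filter (fun q => p q.2)).map Prod.fst
      = xs.filter (fun x => p (f x)) := by
  induction xs with
  | nil => rfl
  | cons x xs ih =>
    simp only [List.map_cons, List.zip_cons_cons, List.filter_cons]
    split <;> simp [ih]

-- the Source B member list for class bit i equals Source A's class_drugs filter
lemma pvMembers (xs : List String) (i : Int) (drugs : List String)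
    (h : ∀ d : String, ((pvMask d >>> i.toNat) &&& 1 != 0) = pvAnyIn drugs (PySem.Str.lower d)) :
    ((xs.zip (xs.map pvMask)).filter (fun dm => (dm.2 >>> i.toNat) &&& 1 != 0)).map Prod.fst
      = xs.filter (fun d => pvAnyIn drugs (PySem.Str.lower d)) :=
  (pvZipFilterG xs pvMask (fun m => (m >>> i.toNat) &&& 1 != 0)).trans
    (List.filter_congr (fun d _ => h d))

-- enumerate(_NAMES) as a literal list
lemma pvEnum : PySem.List.enumerate pvNames
    = [((0 : Int), "statins"), (1, "pcsk9"), (2, "ezetimibe"), (3, "inclisiran")] := by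
  simp [pvNames, PySem.List.enumerate]

-- ===== VERDICT (by name: the statement is the Claim_ definition above) =====
theorem validate_drug_classes_spec : Claim_equal_validate_drug_classes := by
  intro xs _
  show validate_drug_classes xs = validate_drug_classes_alt xs
  unfold validate_drug_classes validate_drug_classes_alt
  rw [pvMasks_eq xs [], pvEnum]
  simp only [List.nil_append, pvClasses, List.foldl_cons, List.foldl_nil]
  rw [pvMembers xs 0 ["atorvastatin", "rosuvastatin"] (fun d => pvMask_bit0 d),
      pvMembers xs 1 ["pcsk9", "evlocumab", "alirocumab"] (fun d => pvMask_bit1 d),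
      pvMembers xs 2 ["ezetimibe"] (fun d => pvMask_bit2 d),
      pvMembers xs 3 ["inclisiran"] (fun d => pvMask_bit3 d)]
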